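-- pv_equiv track=rewrite | github.com/Ralphchi/com-304-Team-11 | nano4M/tests/test_span_masking.py | _runs
-- ===== SOURCE A (Python) =====
-- def _runs(positions):
--     """Group sorted positions into consecutive runs. Returns list of (start, length)."""
--     if not positions:
--         return []
--     positions = sorted(positions)
--     runs = []
--     run_start = positions[0]
--     run_len = 1
--     for p in positions[1:]:
--         if p == run_start + run_len:
--             run_len += 1
--         else:
--             runs.append((run_start, run_len))
--             run_start = p
--             run_len = 1
--     runs.append((run_start, run_len))
--     return runs
-- ===== SOURCE B (Python) =====
-- def _runs(positions):
--     """Group sorted positions into consecutive runs. Returns list of (start, length)."""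
--     runs = []
--     for v in reversed(sorted(positions)):
--         if runs and v + 1 == runs[0][0]:
--             runs[0] = (v, runs[0][1] + 1)
--         else:
--             runs.insert(0, (v, 1))
--     return runs
-- ===== Notes on version B (the rewrite author's own statement) =====
-- stated objective: alternative
-- what changed: Builds the run list back-to-front: iterates the sorted positions in reverse and either extends the run currently at the front of the output (when v+1 equals its start) or prepends a fresh run, instead of A's forward scan carrying a pending (run_start, run_len) accumulator that is flushed on breaks.
import Mathlib
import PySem

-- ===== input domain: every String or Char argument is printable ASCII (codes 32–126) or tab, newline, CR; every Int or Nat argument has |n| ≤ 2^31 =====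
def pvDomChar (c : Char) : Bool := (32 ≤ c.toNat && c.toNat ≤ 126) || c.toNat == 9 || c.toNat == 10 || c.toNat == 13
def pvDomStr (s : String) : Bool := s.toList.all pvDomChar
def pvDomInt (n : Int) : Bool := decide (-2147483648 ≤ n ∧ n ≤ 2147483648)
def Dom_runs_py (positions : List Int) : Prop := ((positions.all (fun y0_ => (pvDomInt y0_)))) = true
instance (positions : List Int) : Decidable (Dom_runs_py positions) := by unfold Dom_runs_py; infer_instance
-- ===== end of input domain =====

-- B builds the run list back-to-front: it walks the sorted positions in reverse and either
-- extends the run at the FRONT of the output or prepends a fresh run (objective: alternative).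

-- ===== PORT A =====
-- loop over positions[1:] with state (runs, run_start, run_len); [] case does the final append
def runsALoop (t : List Int) (runs : List (Int × Int)) (runStart runLen : Int) : List (Int × Int) :=
  match t with
  | [] => runs ++ [(runStart, runLen)]
  | p :: rest =>
    if p = runStart + runLen then runsALoop rest runs runStart (runLen + 1)
    else runsALoop rest (runs ++ [(runStart, runLen)]) p 1

def runs_py (positions : List Int) : List (Int × Int) :=
  if positions = [] then []
  else
    match PySem.List.sorted positions (fun x => x) false with
    | [] => []
    | h :: t => runsALoop t [] h 1

-- ===== PORT B =====
-- one step of B's loop body: extend the front run (runs[0] = (v, l+1)) or prepend (v, 1)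
def runsBStep (runs : List (Int × Int)) (v : Int) : List (Int × Int) :=
  match runs with
  | (s, l) :: rest => if v + 1 = s then (v, l + 1) :: rest else (v, 1) :: (s, l) :: rest
  | [] => [(v, 1)]

-- for v in reversed(sorted(positions)): runsBStep
def runs_py_alt (positions : List Int) : List (Int × Int) :=
  (PySem.List.sorted positions (fun x => x) false).reverse.foldl runsBStep []

-- ===== PRECONDITION & SPEC =====
def Spec_runs_py (positions : List Int) (out : List (Int × Int)) : Prop := out = runs_py_alt positions
instance (positions : List Int) (out : List (Int × Int)) : Decidable (Spec_runs_py positions out) := by unfold Spec_runs_py; infer_instance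

-- ===== CLAIM =====
def Claim_equal_runs_py : Prop := ∀ (positions : List Int), Dom_runs_py positions → Spec_runs_py positions (runs_py positions)

-- ===== LEMMAS AND PROOFS =====

-- A's accumulator only collects finished runs at the back: it can be pulled out front.
theorem runsALoop_append (t : List Int) (runs : List (Int × Int)) (s l : Int) :
    runsALoop t runs s l = runs ++ runsALoop t [] s l := by
  induction t generalizing runs s l with
  | nil => simp [runsALoop]
  | cons p rest ih =>
    by_cases h : p = s + l
    · simp only [runsALoop, if_pos h]; exact ih ..
    · simp only [runsALoop, if_neg h, List.nil_append]
      rw [ih (runs ++ [(s, l)]) p 1, ih [(s, l)] p 1]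
      simp

-- The first run emitted by A's loop starts at the current run start.
theorem runsALoop_head (t : List Int) (s l : Int) :
    ∃ j r, runsALoop t [] s l = (s, j) :: r := by
  induction t generalizing s l with
  | nil => exact ⟨l, [], rfl⟩
  | cons p rest ih =>
    by_cases h : p = s + l
    · simpa only [runsALoop, if_pos h] using ih s (l + 1)
    · refine ⟨l, runsALoop rest [] p 1, ?_⟩
      simp only [runsALoop, if_neg h]
      rw [runsALoop_append]
      simp

-- Moving the run start one left while lengthening the pending run by one only changes
-- the first emitted run (the comparisons depend on runStart + runLen only).
theorem runsALoop_shift (t : List Int) (a len : Int) :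
    runsALoop t [] (a - 1) (len + 1) =
      match runsALoop t [] a len with
      | (s, l) :: r => (s - 1, l + 1) :: r
      | [] => [] := by
  induction t generalizing a len with
  | nil => simp [runsALoop]
  | cons p rest ih =>
    by_cases h : p = a + len
    · have h' : p = (a - 1) + (len + 1) := by omega
      simp only [runsALoop, if_pos h, if_pos h']
      exact ih a (len + 1)
    · have h' : ¬ p = (a - 1) + (len + 1) := by omega
      simp only [runsALoop, if_neg h, if_neg h', List.nil_append]
      rw [runsALoop_append rest [((a : Int) - 1, len + 1)] p 1,
          runsALoop_append rest [((a : Int), len)] p 1]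
      simp

-- Core: A's forward loop equals B's back-to-front fold over the same tail.
theorem runsALoop_eq_foldr (t : List Int) (h : Int) :
    runsALoop t [] h 1 = runsBStep (t.foldr (fun v acc => runsBStep acc v) []) h := by
  induction t generalizing h with
  | nil => rfl
  | cons p rest ih =>
    have hg : (List.foldr (fun v acc => runsBStep acc v) [] (p :: rest))
        = runsALoop rest [] p 1 := by
      simp only [List.foldr]
      exact (ih p).symm
    obtain ⟨j, r, hr⟩ := runsALoop_head rest p 1
    by_cases hc : p = h + 1
    · have : runsALoop (p :: rest) [] h 1 = runsALoop rest [] h 2 := by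
        simp only [runsALoop, if_pos (by omega : p = h + 1)]; norm_num
      rw [this, hg, hr]
      have hsh := runsALoop_shift rest p 1
      rw [hr] at hsh
      have hh : (h : Int) = p - 1 ∧ (2 : Int) = 1 + 1 := ⟨by omega, by norm_num⟩
      rw [hh.1, hh.2, hsh]
      simp only [runsBStep, if_pos (by omega : (p : Int) - 1 + 1 = p)]
    · have : runsALoop (p :: rest) [] h 1 = (h, 1) :: runsALoop rest [] p 1 := by
        simp only [runsALoop, if_neg (by omega : ¬ p = h + 1)]
        rw [runsALoop_append]; simp
      rw [this, hg, hr]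
      simp only [runsBStep, if_neg (by omega : ¬ (h : Int) + 1 = p)]

-- ===== VERDICT =====
theorem runs_py_spec : Claim_equal_runs_py := by
  intro positions _
  unfold Spec_runs_py runs_py runs_py_alt
  by_cases hp : positions = []
  · subst hp; simp [PySem.List.sorted]
  · rw [if_neg hp]
    have hs : PySem.List.sorted positions (fun x => x) false ≠ [] := by
      intro h
      have := PySem.List.sorted_perm positions (fun x => x) false
      rw [h] at this
      exact hp this.symm.eq_nil
    cases hsv : PySem.List.sorted positions (fun x => x) false with
    | nil => exact absurd hsv hs
    | cons h t =>
      rw [List.foldl_reverse]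
      simpa using runsALoop_eq_foldr t h
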